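-- pv_equiv track=rewrite | github.com/sahands/problem-solving | python/google_code_jam/2014/qualifications/war/war.py | deceit
-- ===== SOURCE A (Python) =====
-- def binary_search(A, x):
--     """Return the index of y in A such that y is the first number > x"""
--     start = 0
--     end = len(A)
--     while start < end:
--         m = (end + start) // 2
--         if A[m] < x:
--             start = m + 1
--         else:
--             end = m
--
--     return end if end < len(A) else None
--
-- def deceit(N, A, B):
--     naomi = 0
--     while A:
--         # Here's Naomi's strategy
--         # 1) If she can score a point, she will immediately
--         # 2) If not, she will use her smallest block to destroy Ken's largest.
--         # Quite simple!
--         k = binary_search(A, B[-1])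
--         if k is not None:
--             del B[-1]
--             del A[k]
--             naomi += 1
--         else:
--             del A[0]
--             del B[-1]
--
--     return naomi
-- ===== SOURCE B (Python) =====
-- def bsearch(a, x, lo, hi):
--     # bisection over the window a[lo:hi]; exact same probe sequence as a
--     # bisection of the slice a[lo:hi] starting at 0
--     if lo >= hi:
--         return hi
--     m = (lo + hi) // 2
--     if a[m] < x:
--         return bsearch(a, x, m + 1, hi)
--     return bsearch(a, x, lo, m)
--
-- def deceit(N, A, B):
--     # Same greedy, different mechanics: B is never touched (the b-values are
--     # just the top len(A) elements of B, largest index first), and Naomi's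
--     # sacrificed blocks are skipped with a window pointer lo instead of
--     # physically deleting the head of the list.  A empties both of its list
--     # arguments in place; this version mutates neither argument.
--     a = list(A)
--     lo = naomi = 0
--     for b in reversed(B[len(B) - len(A):]):
--         k = bsearch(a, b, lo, len(a))
--         if k < len(a):
--             del a[k]
--             naomi += 1
--         else:
--             lo += 1
--     return naomi
-- ===== Notes on version B (the rewrite author's own statement) =====
-- stated objective: alternative
-- what changed: Same greedy-with-bisection semantics (forced: on unsorted input the bisection probe sequence IS the behaviour) but different mechanics: a recursive windowed binary search replaces the iterative one with its None sentinel, B is never consumed (b-values come from reversed(B[len(B)-len(A):])), and sacrificing the smallest block is a pointer bump lo += 1 instead of an O(n) del A[0]; B mutates neither argument while A empties both in place.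
import Mathlib
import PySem

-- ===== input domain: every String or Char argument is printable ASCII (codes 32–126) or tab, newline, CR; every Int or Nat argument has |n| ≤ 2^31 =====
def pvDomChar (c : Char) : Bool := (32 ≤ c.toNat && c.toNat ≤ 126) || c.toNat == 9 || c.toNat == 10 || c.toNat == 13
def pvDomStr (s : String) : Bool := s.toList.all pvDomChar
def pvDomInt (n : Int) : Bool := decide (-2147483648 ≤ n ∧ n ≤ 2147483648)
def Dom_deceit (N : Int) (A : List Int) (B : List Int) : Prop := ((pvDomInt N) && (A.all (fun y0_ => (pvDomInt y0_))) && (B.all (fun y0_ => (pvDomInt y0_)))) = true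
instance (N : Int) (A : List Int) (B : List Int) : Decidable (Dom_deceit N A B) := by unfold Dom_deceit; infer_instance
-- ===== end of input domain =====

-- B keeps the same greedy-with-bisection semantics under a different decomposition (recursive
-- windowed binary search, B read via a reversed slice instead of consumed, head sacrifices as a
-- pointer bump); A empties both list arguments in place, B mutates neither — the equivalence
-- proved here is about the return value only.

-- ===== PORT A =====

-- the 'while start < end' loop of binary_search
def bsLoop (A : List Int) (x : Int) (start : Int) (end_ : Int) : Int :=
  if h : start < end_ then
    let m := PySem.Int.floordiv (end_ + start) 2
    if PySem.List.pyGetD A m 0 < x then     -- A[m] always in range when called as Python does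
      bsLoop A x (m + 1) end_
    else
      bsLoop A x start m
  else end_
termination_by (end_ - start).toNat
decreasing_by
  · have h1 : start ≤ PySem.Int.floordiv (end_ + start) 2 := by
      rw [PySem.Int.le_floordiv_iff_mul_le] <;> omega
    omega
  · have h2 : PySem.Int.floordiv (end_ + start) 2 < end_ := by
      rw [PySem.Int.floordiv_lt_iff_lt_mul] <;> omega
    have h1 : start ≤ PySem.Int.floordiv (end_ + start) 2 := by
      rw [PySem.Int.le_floordiv_iff_mul_le] <;> omega
    omega

def binary_search (A : List Int) (x : Int) : Option Int :=
  let e := bsLoop A x 0 (A.length : Int)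
  if e < (A.length : Int) then some e else none

-- the 'while A:' loop; fuel = len(A) (each round deletes one element of A)
def deceitGo : Nat → List Int → List Int → Int → Int
  | 0, _, _, naomi => naomi
  | fuel + 1, A, B, naomi =>
    if A.isEmpty then naomi
    else
      match binary_search A (PySem.List.pyGetD B (-1) 0) with   -- B[-1]; Pre_ keeps B nonempty here
      | some k => deceitGo fuel (A.eraseIdx k.toNat) B.dropLast (naomi + 1)  -- del B[-1]; del A[k] (k in range)
      | none   => deceitGo fuel A.tail B.dropLast naomi                      -- del A[0]; del B[-1]

def deceit (N : Int) (A : List Int) (B : List Int) : Int :=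
  deceitGo A.length A B 0

-- ===== PORT B =====

-- Source B's recursive bisection over the window a[lo:hi]
def bsearch (a : List Int) (x : Int) (lo : Int) (hi : Int) : Int :=
  if h : lo ≥ hi then hi
  else
    let m := PySem.Int.floordiv (lo + hi) 2
    if PySem.List.pyGetD a m 0 < x then    -- a[m] always in range when called as Source B does
      bsearch a x (m + 1) hi
    else
      bsearch a x lo m
termination_by (hi - lo).toNat
decreasing_by
  · have h1 : lo ≤ PySem.Int.floordiv (lo + hi) 2 := by
      rw [PySem.Int.le_floordiv_iff_mul_le] <;> omega
    omega
  · have h2 : PySem.Int.floordiv (lo + hi) 2 < hi := by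
      rw [PySem.Int.floordiv_lt_iff_lt_mul] <;> omega
    have h1 : lo ≤ PySem.Int.floordiv (lo + hi) 2 := by
      rw [PySem.Int.le_floordiv_iff_mul_le] <;> omega
    omega

-- loop body of Source B's for-loop: state is (a, lo, naomi)
def altStep (s : List Int × Int × Int) (b : Int) : List Int × Int × Int :=
  let k := bsearch s.1 b s.2.1 (s.1.length : Int)
  if k < (s.1.length : Int) then (s.1.eraseIdx k.toNat, s.2.1, s.2.2 + 1)   -- del a[k] (k in range)
  else (s.1, s.2.1 + 1, s.2.2)

def deceit_alt (N : Int) (A : List Int) (B : List Int) : Int :=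
  let bvals := (PySem.List.slice B (some ((B.length : Int) - (A.length : Int))) none).reverse
  (bvals.foldl altStep (A, 0, 0)).2.2

-- ===== PRECONDITION & SPEC =====
-- Pre_ excludes exactly the inputs with len(A) > len(B), on which A raises IndexError at B[-1].
def Pre_deceit (N : Int) (A : List Int) (B : List Int) : Prop := A.length ≤ B.length
instance (N : Int) (A : List Int) (B : List Int) : Decidable (Pre_deceit N A B) := by
  unfold Pre_deceit; infer_instance

def pvWitness_deceit : Int × List Int × List Int := (0, [3, 1], [2, 4, 2])

def Spec_deceit (N : Int) (A : List Int) (B : List Int) (out : Int) : Prop := out = deceit_alt N A B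
instance (N : Int) (A : List Int) (B : List Int) (out : Int) : Decidable (Spec_deceit N A B out) := by unfold Spec_deceit; infer_instance

-- ===== CLAIM (what is proved, stated in full; the proofs are below) =====
def Claim_equal_deceit : Prop := ∀ (N : Int) (A : List Int) (B : List Int), Dom_deceit N A B → Pre_deceit N A B → Spec_deceit N A B (deceit N A B)

-- ===== LEMMAS AND PROOFS =====

-- floor division by 2 commutes with shifting by 2*k
theorem fdiv_shift (t k : Int) :
    PySem.Int.floordiv (t - 2 * k) 2 = PySem.Int.floordiv t 2 - k := by
  have h1 : PySem.Int.floordiv t 2 * 2 ≤ t ∧ t < (PySem.Int.floordiv t 2 + 1) * 2 :=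
    (PySem.Int.floordiv_eq_iff_of_pos (by omega)).mp rfl
  exact (PySem.Int.floordiv_eq_iff_of_pos (by omega)).mpr (by constructor <;> nlinarith [h1.1, h1.2])

-- bsearch stays inside its bounds
theorem bsearch_bounds (a : List Int) (x : Int) :
    ∀ (fk : Nat) (s e : Int), (e - s).toNat ≤ fk → s ≤ e →
      s ≤ bsearch a x s e ∧ bsearch a x s e ≤ e := by
  intro fk
  induction fk with
  | zero =>
    intro s e hk hse
    rw [bsearch]
    have h0 : s ≥ e := by omega
    simp only [ge_iff_le, h0, dite_true]
    omega
  | succ fk ih =>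
    intro s e hk hse
    rw [bsearch]
    by_cases hge : s ≥ e
    · simp only [ge_iff_le, hge, dite_true]
      omega
    · simp only [ge_iff_le, hge, dite_false]
      have hm1 : s ≤ PySem.Int.floordiv (s + e) 2 := by
        rw [PySem.Int.le_floordiv_iff_mul_le] <;> omega
      have hm2 : PySem.Int.floordiv (s + e) 2 < e := by
        rw [PySem.Int.floordiv_lt_iff_lt_mul] <;> omega
      set m := PySem.Int.floordiv (s + e) 2 with hm
      by_cases hcmp : PySem.List.pyGetD a m 0 < x
      · simp only [hcmp, if_true]
        have := ih (m + 1) e (by omega) (by omega)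
        omega
      · simp only [hcmp, if_false]
        have := ih s m (by omega) (by omega)
        omega

-- A's iterative bisection of the live window a[lo:] equals B's windowed recursive
-- bisection of the full list, shifted by lo
theorem bsLoop_shift (a : List Int) (x : Int) :
    ∀ (fk : Nat) (lo s e : Int), (e - s).toNat ≤ fk → 0 ≤ lo → lo ≤ s → e ≤ (a.length : Int) →
      bsLoop (a.drop lo.toNat) x (s - lo) (e - lo) = bsearch a x s e - lo := by
  intro fk
  induction fk with
  | zero =>
    intro lo s e hk h0 hls hel
    rw [bsLoop, bsearch]
    have h1 : ¬ s - lo < e - lo := by omega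
    by_cases h2 : s ≥ e
    · simp only [h1, dite_false, ge_iff_le, h2, dite_true]
    · omega
  | succ fk ih =>
    intro lo s e hk h0 hls hel
    rw [bsLoop, bsearch]
    by_cases hlt : s < e
    · have h1 : s - lo < e - lo := by omega
      have h2 : ¬ s ≥ e := by omega
      simp only [h1, dite_true, ge_iff_le, h2, dite_false]
      have hmshift : PySem.Int.floordiv ((e - lo) + (s - lo)) 2
          = PySem.Int.floordiv (s + e) 2 - lo := by
        have := fdiv_shift (s + e) lo
        have harg : (e - lo) + (s - lo) = (s + e) - 2 * lo := by ring
        rw [harg, this]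
      have hm1 : s ≤ PySem.Int.floordiv (s + e) 2 := by
        rw [PySem.Int.le_floordiv_iff_mul_le] <;> omega
      have hm2 : PySem.Int.floordiv (s + e) 2 < e := by
        rw [PySem.Int.floordiv_lt_iff_lt_mul] <;> omega
      set m := PySem.Int.floordiv (s + e) 2 with hm
      have hmlen : m.toNat < a.length := by omega
      have hdlen : (a.drop lo.toNat).length = a.length - lo.toNat := List.length_drop
      have hgetfull : PySem.List.pyGetD a m 0 = a[m.toNat]'(hmlen) :=
        PySem.List.pyGetD_eq_getElem a 0 (by omega) (by omega)
      have hgetdrop : PySem.List.pyGetD (a.drop lo.toNat) (m - lo) 0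
          = a[m.toNat]'(hmlen) := by
        have hin : (m - lo).toNat < (a.drop lo.toNat).length := by omega
        have h3 : PySem.List.pyGetD (a.drop lo.toNat) (m - lo) 0
            = (a.drop lo.toNat)[(m - lo).toNat]'(hin) :=
          PySem.List.pyGetD_eq_getElem (a.drop lo.toNat) 0 (by omega) (by omega)
        rw [h3]
        rw [List.getElem_drop]
        congr 1
        omega
      rw [hmshift]
      by_cases hcmp : PySem.List.pyGetD a m 0 < x
      · have hcd : PySem.List.pyGetD (a.drop lo.toNat) (m - lo) 0 < x := by
          rw [hgetdrop, ← hgetfull]; exact hcmp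
        simp only [hcmp, hcd, if_true]
        have harg2 : m - lo + 1 = (m + 1) - lo := by ring
        rw [harg2]
        exact ih lo (m + 1) e (by omega) h0 (by omega) hel
      · have hcd : ¬ PySem.List.pyGetD (a.drop lo.toNat) (m - lo) 0 < x := by
          rw [hgetdrop, ← hgetfull]; exact hcmp
        simp only [hcmp, hcd, if_false]
        exact ih lo s m (by omega) h0 hls (by omega)
    · have h1 : ¬ s - lo < e - lo := by omega
      have h2 : s ≥ e := by omega
      simp only [h1, dite_false, ge_iff_le, h2, dite_true]

-- deleting at absolute index lo + i commutes with dropping the first lo elements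
theorem eraseIdx_drop_comm : ∀ (lo : Nat) (l : List Int) (i : Nat),
    (l.eraseIdx (lo + i)).drop lo = (l.drop lo).eraseIdx i := by
  intro lo
  induction lo with
  | zero => intro l i; simp
  | succ lo ih =>
    intro l i
    cases l with
    | nil => simp
    | cons h t =>
      have harg : lo + 1 + i = (lo + i) + 1 := by omega
      rw [harg]
      simp only [List.eraseIdx_cons_succ, List.drop_succ_cons]
      exact ih t i

-- bisimulation: A's destructive loop on the window a[lo:] and the tail of B it still
-- holds equals Source B's fold over the reversed top slice of B
theorem deceit_bisim : ∀ (bs : List Int) (a : List Int) (lo n : Int) (P : List Int),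
    0 ≤ lo → lo.toNat ≤ a.length → a.length - lo.toNat = bs.length →
    deceitGo (a.length - lo.toNat) (a.drop lo.toNat) (P ++ bs.reverse) n
      = (bs.foldl altStep (a, lo, n)).2.2 := by
  intro bs
  induction bs with
  | nil =>
    intro a lo n P h0 hla hlen
    rw [hlen]
    simp [deceitGo]
  | cons b bs ih =>
    intro a lo n P h0 hla hlen
    have hlen' : a.length - lo.toNat = bs.length + 1 := by simpa using hlen
    rw [hlen', deceitGo]
    have hdlen : (a.drop lo.toNat).length = a.length - lo.toNat := List.length_drop
    have hne : (a.drop lo.toNat).isEmpty = false := by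
      rw [List.isEmpty_eq_false_iff]
      intro hnil
      have : (a.drop lo.toNat).length = 0 := by rw [hnil]; rfl
      omega
    simp only [hne, Bool.false_eq_true, if_false]
    have hrev : P ++ (b :: bs).reverse = (P ++ bs.reverse) ++ [b] := by
      simp [List.reverse_cons]
    rw [hrev, PySem.List.pyGetD_neg_one_append_singleton]
    set k := bsearch a b lo (a.length : Int) with hkdef
    have hkb := bsearch_bounds a b ((a.length : Int) - lo).toNat lo (a.length : Int)
      (le_refl _) (by omega)
    have hlok : lo ≤ k := by rw [hkdef]; exact hkb.1
    have hkle : k ≤ (a.length : Int) := by rw [hkdef]; exact hkb.2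
    have hshift := bsLoop_shift a b ((a.length : Int) - lo).toNat lo lo (a.length : Int)
      (le_refl _) h0 (le_refl _) (le_refl _)
    have hcast : ((a.drop lo.toNat).length : Int) = (a.length : Int) - lo := by
      rw [hdlen]; omega
    have hbin : binary_search (a.drop lo.toNat) b
        = if k < (a.length : Int) then some (k - lo) else none := by
      simp only [binary_search, hcast]
      rw [show (0 : Int) = lo - lo from by ring, hshift, ← hkdef]
      by_cases hk : k < (a.length : Int)
      · rw [if_pos (by omega : k - lo < (a.length : Int) - lo), if_pos hk]
      · rw [if_neg (by omega : ¬ (k - lo < (a.length : Int) - lo)), if_neg hk]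
    rw [hbin]
    by_cases hk : k < (a.length : Int)
    · simp only [hk, if_true]
      have hkN : k.toNat < a.length := by omega
      have hstep : altStep (a, lo, n) b = (a.eraseIdx k.toNat, lo, n + 1) := by
        simp only [altStep, ← hkdef]
        simp [hk]
      have hElen : (a.eraseIdx k.toNat).length = a.length - 1 := by
        rw [List.length_eraseIdx]
        simp [hkN]
      have hEdrop : (a.eraseIdx k.toNat).drop lo.toNat
          = (a.drop lo.toNat).eraseIdx (k - lo).toNat := by
        have hk1 : k.toNat = lo.toNat + (k - lo).toNat := by omega
        rw [hk1, eraseIdx_drop_comm]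
      rw [List.dropLast_concat]
      have hih := ih (a.eraseIdx k.toNat) lo (n + 1) P h0 (by omega) (by omega)
      rw [hElen] at hih
      rw [show a.length - 1 - lo.toNat = bs.length from by omega] at hih
      rw [hEdrop] at hih
      rw [hih, List.foldl_cons, hstep]
    · simp only [hk, if_false]
      have hstep : altStep (a, lo, n) b = (a, lo + 1, n) := by
        simp only [altStep, ← hkdef]
        simp [hk]
      have htail : (a.drop lo.toNat).tail = a.drop (lo + 1).toNat := by
        rw [List.tail_drop]
        congr 1
        omega
      rw [List.dropLast_concat, htail]
      have hih := ih a (lo + 1) n P (by omega) (by omega) (by omega)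
      rw [show a.length - (lo + 1).toNat = bs.length from by omega] at hih
      rw [hih, List.foldl_cons, hstep]

-- ===== VERDICT (by name: the statement is the Claim_ definition above) =====
theorem deceit_spec : Claim_equal_deceit := by
  intro N A B _ hPre
  unfold Pre_deceit at hPre
  unfold Spec_deceit deceit deceit_alt
  have hd : ((B.length : Int) - (A.length : Int)) = ((B.length - A.length : Nat) : Int) := by
    omega
  rw [hd, PySem.List.slice_from_natCast]
  have hmain := deceit_bisim ((B.drop (B.length - A.length)).reverse) A 0 0
    (B.take (B.length - A.length)) (le_refl 0) (by omega)
    (by simp [List.length_drop]; omega)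
  simpa using hmain
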